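-- pv_equiv track=rewrite | github.com/shuheng-mo/Elytra | src/connectors/clickhouse_connector.py | _unwrap_type
-- ===== SOURCE A (Python) =====
-- _TYPE_WRAPPERS = ("LowCardinality", "Nullable")
--
-- def _unwrap_type(raw: str) -> tuple[str, bool]:
--     """Strip ``LowCardinality(...)`` / ``Nullable(...)`` wrappers.
--
--     Returns ``(inner_type, nullable)`` — the wrappers can nest in any order
--     (e.g. ``LowCardinality(Nullable(String))``) so we loop until neither
--     wrapper is left on the outside.
--     """
--     s = raw.strip()
--     nullable = False
--     changed = True
--     while changed:
--         changed = False
--         for wrapper in _TYPE_WRAPPERS: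
--             prefix = f"{wrapper}("
--             if s.startswith(prefix) and s.endswith(")"):
--                 s = s[len(prefix):-1].strip()
--                 if wrapper == "Nullable":
--                     nullable = True
--                 changed = True
--     return s, nullable
-- ===== SOURCE B (Python) =====
-- _TYPE_WRAPPERS = ("LowCardinality", "Nullable")
--
-- def _unwrap_type(raw: str) -> tuple[str, bool]:
--     """Strip LowCardinality(...)/Nullable(...) wrappers by recursion on the
--     nesting structure, accumulating the nullable flag on the way back up."""
--     def peel(s: str) -> tuple[str, bool]:
--         if s.startswith("LowCardinality(") and s.endswith(")"):
--             return peel(s[len("LowCardinality("):-1].strip())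
--         if s.startswith("Nullable(") and s.endswith(")"):
--             inner, _ = peel(s[len("Nullable("):-1].strip())
--             return inner, True
--         return s, False
--     return peel(raw.strip())
-- ===== Notes on version B (the rewrite author's own statement) =====
-- stated objective: simpler
-- what changed: Replaces the while-changed loop with mutable state and an inner for-pass over both wrappers by a direct recursion on the nesting structure that peels one wrapper per call and ORs the nullable flag on return.
import Mathlib
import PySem

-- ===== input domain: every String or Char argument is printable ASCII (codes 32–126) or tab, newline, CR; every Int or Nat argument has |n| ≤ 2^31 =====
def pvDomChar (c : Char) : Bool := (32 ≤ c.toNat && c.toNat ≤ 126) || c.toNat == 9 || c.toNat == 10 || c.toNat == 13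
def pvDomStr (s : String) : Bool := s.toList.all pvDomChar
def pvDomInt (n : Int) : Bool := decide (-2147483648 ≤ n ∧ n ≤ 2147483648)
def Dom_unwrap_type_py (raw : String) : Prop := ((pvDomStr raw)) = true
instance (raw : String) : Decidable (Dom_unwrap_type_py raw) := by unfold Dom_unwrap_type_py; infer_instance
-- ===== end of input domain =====

-- B replaces A's while-changed loop (mutable state, inner for-pass over both wrappers)
-- by a direct recursion on the nesting structure that peels one wrapper per call
-- and ORs the nullable flag on return; same return value (objective: simpler).


-- ===== PORT A =====
-- the two wrapper prefixes, as f"{wrapper}("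
def pvLC : List Char := "LowCardinality(".toList
def pvNU : List Char := "Nullable(".toList

-- s[len(prefix):-1].strip()
def pvPeel (pfx s : List Char) : List Char :=
  PySem.Chars.strip (PySem.Chars.slice s (some (pfx.length : Int)) (some (-1)))

lemma pvStrip_len_le (s : List Char) : (PySem.Chars.strip s).length ≤ s.length := by
  unfold PySem.Chars.strip PySem.Chars.rstrip PySem.Chars.lstrip
  have h1 := List.length_dropWhile_le PySem.Chars.isspace s
  have h2 := List.length_dropWhile_le PySem.Chars.isspace
      (List.dropWhile PySem.Chars.isspace s).reverse
  simp only [List.length_reverse] at *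
  omega

lemma pvPeel_lt (pfx s : List Char) (hne : pfx ≠ [])
    (h : PySem.Chars.startswith s pfx = true) : (pvPeel pfx s).length < s.length := by
  have hp : pfx <+: s := (PySem.Chars.startswith_iff s pfx).mp h
  have hle : pfx.length ≤ s.length := hp.length_le
  have hpos : 1 ≤ pfx.length := by
    cases pfx with
    | nil => exact absurd rfl hne
    | cons a t => simp
  unfold pvPeel
  have hstrip := pvStrip_len_le (PySem.Chars.slice s (some (pfx.length : Int)) (some (-1)))
  have hslice : (PySem.Chars.slice s (some (pfx.length : Int)) (some (-1))).length
      = (s.length - 1) - min pfx.length s.length := by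
    simp [PySem.Chars.slice_eq_listSlice, PySem.List.length_slice,
      PySem.List.clampIdx_natCast]
  omega

-- for-loop body, first iteration (wrapper = "LowCardinality"): (new s, changed)
def pvAPass1 (s : List Char) : List Char × Bool :=
  if PySem.Chars.startswith s pvLC && PySem.Chars.endswith s [')'] then
    (pvPeel pvLC s, true)
  else (s, false)

-- for-loop body, both iterations: (new s, new nullable, changed)
def pvAPass (s : List Char) (nb : Bool) : List Char × Bool × Bool :=
  let s1 := (pvAPass1 s).1
  if PySem.Chars.startswith s1 pvNU && PySem.Chars.endswith s1 [')'] then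
    (pvPeel pvNU s1, true, true)
  else (s1, nb, (pvAPass1 s).2)

lemma pvAPass_lt (s : List Char) (nb : Bool) (h : (pvAPass s nb).2.2 = true) :
    (pvAPass s nb).1.length < s.length := by
  unfold pvAPass pvAPass1 at *
  by_cases hLC : (PySem.Chars.startswith s pvLC && PySem.Chars.endswith s [')']) = true
  · have h1 : (pvPeel pvLC s).length < s.length :=
      pvPeel_lt pvLC s (by decide) ((Bool.and_eq_true _ _ |>.mp hLC).1)
    simp only [hLC, if_true] at h ⊢
    by_cases hNU : (PySem.Chars.startswith (pvPeel pvLC s) pvNU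
        && PySem.Chars.endswith (pvPeel pvLC s) [')']) = true
    · simp only [hNU, if_true]
      have h2 : (pvPeel pvNU (pvPeel pvLC s)).length < (pvPeel pvLC s).length :=
        pvPeel_lt pvNU _ (by decide) ((Bool.and_eq_true _ _ |>.mp hNU).1)
      omega
    · have hNU' : (PySem.Chars.startswith (pvPeel pvLC s) pvNU
          && PySem.Chars.endswith (pvPeel pvLC s) [')']) = false := by simpa using hNU
      simp only [hNU', Bool.false_eq_true, if_false]
      exact h1
  · have hLC' : (PySem.Chars.startswith s pvLC && PySem.Chars.endswith s [')']) = false := by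
      simpa using hLC
    simp only [hLC', Bool.false_eq_true, if_false] at h ⊢
    by_cases hNU : (PySem.Chars.startswith s pvNU && PySem.Chars.endswith s [')']) = true
    · simp only [hNU, if_true]
      exact pvPeel_lt pvNU s (by decide) ((Bool.and_eq_true _ _ |>.mp hNU).1)
    · have hNU' : (PySem.Chars.startswith s pvNU && PySem.Chars.endswith s [')']) = false := by
        simpa using hNU
      simp only [hNU', Bool.false_eq_true, if_false] at h

-- while changed: loop
def pvALoop (s : List Char) (nb : Bool) : List Char × Bool :=
  if h : (pvAPass s nb).2.2 = true then
    pvALoop (pvAPass s nb).1 (pvAPass s nb).2.1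
  else ((pvAPass s nb).1, (pvAPass s nb).2.1)
  termination_by s.length
  decreasing_by exact pvAPass_lt s nb h

def unwrap_type_py (raw : String) : String × Bool :=
  let r := pvALoop (PySem.Chars.strip raw.toList) false
  (String.ofList r.1, r.2)

-- ===== PORT B =====
-- recursive peel: one wrapper per call, nullable ORed on the way up
def pvBRec (s : List Char) : List Char × Bool :=
  if h1 : (PySem.Chars.startswith s pvLC && PySem.Chars.endswith s [')']) = true then
    pvBRec (pvPeel pvLC s)
  else if h2 : (PySem.Chars.startswith s pvNU && PySem.Chars.endswith s [')']) = true then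
    ((pvBRec (pvPeel pvNU s)).1, true)
  else (s, false)
  termination_by s.length
  decreasing_by
  · exact pvPeel_lt pvLC s (by decide) ((Bool.and_eq_true _ _ |>.mp h1).1)
  · exact pvPeel_lt pvNU s (by decide) ((Bool.and_eq_true _ _ |>.mp h2).1)

def unwrap_type_py_alt (raw : String) : String × Bool :=
  let r := pvBRec (PySem.Chars.strip raw.toList)
  (String.ofList r.1, r.2)

-- ===== PRECONDITION & SPEC =====
def Spec_unwrap_type_py (raw : String) (out : String × Bool) : Prop := out = unwrap_type_py_alt raw
instance (raw : String) (out : String × Bool) : Decidable (Spec_unwrap_type_py raw out) := by unfold Spec_unwrap_type_py; infer_instance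

-- ===== CLAIM (what is proved, stated in full; the proofs are below) =====
def Claim_equal_unwrap_type_py : Prop := ∀ (raw : String), Dom_unwrap_type_py raw → Spec_unwrap_type_py raw (unwrap_type_py raw)

-- ===== LEMMAS AND PROOFS =====

-- case-analysis lemmas for one pass of A's loop body
lemma pvAPass_eq1 (s : List Char) (nb : Bool)
    (hLC : (PySem.Chars.startswith s pvLC && PySem.Chars.endswith s [')']) = true)
    (hNU : (PySem.Chars.startswith (pvPeel pvLC s) pvNU
        && PySem.Chars.endswith (pvPeel pvLC s) [')']) = true) :
    pvAPass s nb = (pvPeel pvNU (pvPeel pvLC s), true, true) := by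
  simp [pvAPass, pvAPass1, hLC, hNU]

lemma pvAPass_eq2 (s : List Char) (nb : Bool)
    (hLC : (PySem.Chars.startswith s pvLC && PySem.Chars.endswith s [')']) = true)
    (hNU : (PySem.Chars.startswith (pvPeel pvLC s) pvNU
        && PySem.Chars.endswith (pvPeel pvLC s) [')']) = false) :
    pvAPass s nb = (pvPeel pvLC s, nb, true) := by
  simp [pvAPass, pvAPass1, hLC, hNU]

lemma pvAPass_eq3 (s : List Char) (nb : Bool)
    (hLC : (PySem.Chars.startswith s pvLC && PySem.Chars.endswith s [')']) = false)
    (hNU : (PySem.Chars.startswith s pvNU && PySem.Chars.endswith s [')']) = true) :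
    pvAPass s nb = (pvPeel pvNU s, true, true) := by
  simp [pvAPass, pvAPass1, hLC, hNU]

lemma pvAPass_eq4 (s : List Char) (nb : Bool)
    (hLC : (PySem.Chars.startswith s pvLC && PySem.Chars.endswith s [')']) = false)
    (hNU : (PySem.Chars.startswith s pvNU && PySem.Chars.endswith s [')']) = false) :
    pvAPass s nb = (s, nb, false) := by
  simp [pvAPass, pvAPass1, hLC, hNU]

-- case-analysis lemmas for one step of B's recursion
lemma pvBRec_LC (s : List Char)
    (hLC : (PySem.Chars.startswith s pvLC && PySem.Chars.endswith s [')']) = true) :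
    pvBRec s = pvBRec (pvPeel pvLC s) := by
  rw [pvBRec]; simp [hLC]

lemma pvBRec_NU (s : List Char)
    (hLC : (PySem.Chars.startswith s pvLC && PySem.Chars.endswith s [')']) = false)
    (hNU : (PySem.Chars.startswith s pvNU && PySem.Chars.endswith s [')']) = true) :
    pvBRec s = ((pvBRec (pvPeel pvNU s)).1, true) := by
  rw [pvBRec]; simp [hLC, hNU]

lemma pvBRec_none (s : List Char)
    (hLC : (PySem.Chars.startswith s pvLC && PySem.Chars.endswith s [')']) = false)
    (hNU : (PySem.Chars.startswith s pvNU && PySem.Chars.endswith s [')']) = false) :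
    pvBRec s = (s, false) := by
  rw [pvBRec]; simp [hLC, hNU]

-- a string cannot start with both "Nullable(" and "LowCardinality("
lemma pvDisj (s : List Char) (h : PySem.Chars.startswith s pvNU = true) :
    PySem.Chars.startswith s pvLC = false := by
  obtain ⟨t, ht⟩ := (PySem.Chars.startswith_iff s pvNU).mp h
  cases hLC : PySem.Chars.startswith s pvLC with
  | false => rfl
  | true =>
    obtain ⟨u, hu⟩ := (PySem.Chars.startswith_iff s pvLC).mp hLC
    rw [← ht] at hu
    simp [pvNU, pvLC] at hu

lemma pvMain : ∀ (s : List Char) (nb : Bool),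
    pvALoop s nb = ((pvBRec s).1, nb || (pvBRec s).2) := by
  have H : ∀ (n : Nat) (s : List Char), s.length < n → ∀ nb,
      pvALoop s nb = ((pvBRec s).1, nb || (pvBRec s).2) := by
    intro n
    induction n with
    | zero => intro s h; omega
    | succ n ih =>
      intro s hs nb
      rw [pvALoop]
      by_cases hLC : (PySem.Chars.startswith s pvLC && PySem.Chars.endswith s [')']) = true
      · have hlt1 : (pvPeel pvLC s).length < s.length :=
          pvPeel_lt pvLC s (by decide) ((Bool.and_eq_true _ _ |>.mp hLC).1)
        by_cases hNU : (PySem.Chars.startswith (pvPeel pvLC s) pvNU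
            && PySem.Chars.endswith (pvPeel pvLC s) [')']) = true
        · -- both wrappers peeled in A's single pass
          have hlt2 : (pvPeel pvNU (pvPeel pvLC s)).length < (pvPeel pvLC s).length :=
            pvPeel_lt pvNU _ (by decide) ((Bool.and_eq_true _ _ |>.mp hNU).1)
          have hnLC : (PySem.Chars.startswith (pvPeel pvLC s) pvLC
              && PySem.Chars.endswith (pvPeel pvLC s) [')']) = false := by
            have := pvDisj (pvPeel pvLC s) ((Bool.and_eq_true _ _ |>.mp hNU).1)
            simp [this]
          rw [pvAPass_eq1 s nb hLC hNU, dif_pos rfl]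
          show pvALoop (pvPeel pvNU (pvPeel pvLC s)) true = _
          rw [ih _ (by omega) true, pvBRec_LC s hLC, pvBRec_NU _ hnLC hNU]
          simp
        · -- only the LowCardinality layer peeled this pass
          have hNU' : (PySem.Chars.startswith (pvPeel pvLC s) pvNU
              && PySem.Chars.endswith (pvPeel pvLC s) [')']) = false := by simpa using hNU
          rw [pvAPass_eq2 s nb hLC hNU', dif_pos rfl]
          show pvALoop (pvPeel pvLC s) nb = _
          rw [ih _ (by omega) nb, pvBRec_LC s hLC]
      · have hLC' : (PySem.Chars.startswith s pvLC && PySem.Chars.endswith s [')']) = false := by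
          simpa using hLC
        by_cases hNU : (PySem.Chars.startswith s pvNU && PySem.Chars.endswith s [')']) = true
        · have hlt2 : (pvPeel pvNU s).length < s.length :=
            pvPeel_lt pvNU s (by decide) ((Bool.and_eq_true _ _ |>.mp hNU).1)
          rw [pvAPass_eq3 s nb hLC' hNU, dif_pos rfl]
          show pvALoop (pvPeel pvNU s) true = _
          rw [ih _ (by omega) true, pvBRec_NU s hLC' hNU]
          simp
        · have hNU' : (PySem.Chars.startswith s pvNU && PySem.Chars.endswith s [')']) = false := by
            simpa using hNU
          rw [pvAPass_eq4 s nb hLC' hNU', dif_neg (by simp), pvBRec_none s hLC' hNU']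
          simp
  exact fun s nb => H (s.length + 1) s (by omega) nb

-- ===== VERDICT (by name: the statement is the Claim_ definition above) =====
theorem unwrap_type_py_spec : Claim_equal_unwrap_type_py := by
  intro raw _
  unfold Spec_unwrap_type_py unwrap_type_py unwrap_type_py_alt
  rw [pvMain]
  simp
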